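-- pv_equiv track=rewrite | github.com/rustam2027/algs_additional | strange_tree_43/Solution_third_try.py | find_first_smaller
-- ===== SOURCE A (Python) =====
-- def find_first_smaller(arr, value):
--     left, right = 0, len(arr) - 1
--     result = -1
--
--     while left <= right:
--         mid = (left + right) // 2
--         if arr[mid] < value:
--             result = mid
--             left = mid + 1
--         else:
--             right = mid - 1
--
--     return result
-- ===== SOURCE B (Python) =====
-- def find_first_smaller(arr, value):
--     def helper(seg, offset):
--         if not seg:
--             return -1
--         k = (len(seg) - 1) // 2
--         if seg[k] < value:
--             r = helper(seg[k + 1:], offset + k + 1)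
--             return r if r != -1 else offset + k
--         return helper(seg[:k], offset)
--     return helper(arr, 0)
-- ===== Notes on version B (the rewrite author's own statement) =====
-- stated objective: alternative
-- what changed: Replaced the iterative index-based binary search over mutable left/right/result integers by a recursive helper that descends into list slices carrying an offset: it returns -1 on an empty segment, probes the segment's midpoint, and prefers the right slice's answer over the probed midpoint.
import Mathlib
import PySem

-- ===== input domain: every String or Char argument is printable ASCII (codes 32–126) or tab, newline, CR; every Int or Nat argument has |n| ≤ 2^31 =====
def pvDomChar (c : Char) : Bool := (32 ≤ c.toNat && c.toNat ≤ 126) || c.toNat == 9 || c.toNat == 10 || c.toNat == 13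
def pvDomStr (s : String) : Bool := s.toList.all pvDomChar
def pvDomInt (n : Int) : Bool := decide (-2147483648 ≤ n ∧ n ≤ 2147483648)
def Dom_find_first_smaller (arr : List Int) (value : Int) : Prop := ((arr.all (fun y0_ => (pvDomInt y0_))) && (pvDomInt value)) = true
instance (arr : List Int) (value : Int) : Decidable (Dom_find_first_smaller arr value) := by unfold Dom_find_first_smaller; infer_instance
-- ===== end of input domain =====

-- B replaces A's iterative index-based binary search (mutable left/right/result ints) by a
-- recursive helper descending into list slices with an offset; objective: alternative.


-- ===== PORT A =====
-- the while loop of A, as structural recursion on a fuel that only guards totality: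
-- each iteration shrinks right+1-left by at least 1 (mid stays in [left,right]), so
-- fuel = arr.length ≥ the initial range size is never exhausted on the real run.
-- arr[mid] is ported as (pyGet? …).getD 0, exact here because on A's probe path
-- 0 ≤ left ≤ mid ≤ right < len, so every probed index is in range (Python never raises)
def pvLoopA (arr : List Int) (value : Int) : Nat → Int → Int → Int → Int
  | 0, _, _, result => result
  | fuel + 1, left, right, result =>
    if left ≤ right then
      if (PySem.List.pyGet? arr (PySem.Int.floordiv (left + right) 2)).getD 0 < value then
        pvLoopA arr value fuel (PySem.Int.floordiv (left + right) 2 + 1) right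
          (PySem.Int.floordiv (left + right) 2)
      else
        pvLoopA arr value fuel left (PySem.Int.floordiv (left + right) 2 - 1) result
    else result

def find_first_smaller (arr : List Int) (value : Int) : Int :=
  pvLoopA arr value arr.length 0 (arr.length - 1) (-1)

-- ===== PORT B =====
-- Source B's helper(seg, offset): -1 on an empty segment, probe the midpoint of the segment,
-- prefer the right slice's answer over the probed midpoint.  Python's nonneg in-range
-- slices seg[k+1:] / seg[:k] are exactly List.drop (k+1) / List.take k, and seg[k]
-- (0 ≤ k < len(seg) always) is exactly seg.getD k 0; (len(seg)-1)//2 with len ≥ 1 is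
-- exactly Nat division (seg.length - 1) / 2.
def pvHelperB (value : Int) (seg : List Int) (offset : Int) : Int :=
  if h : seg = [] then -1
  else
    let k := (seg.length - 1) / 2
    if seg.getD k 0 < value then
      let r := pvHelperB value (seg.drop (k + 1)) (offset + (k : Int) + 1)
      if r ≠ -1 then r else offset + (k : Int)
    else
      pvHelperB value (seg.take k) offset
termination_by seg.length
decreasing_by
  · have hne : seg.length ≠ 0 := fun hc => h (List.eq_nil_of_length_eq_zero hc)
    simp only [List.length_drop]; omega
  · have hne : seg.length ≠ 0 := fun hc => h (List.eq_nil_of_length_eq_zero hc)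
    have := Nat.div_le_self (seg.length - 1) 2
    simp only [List.length_take]; omega

def find_first_smaller_alt (arr : List Int) (value : Int) : Int :=
  pvHelperB value arr 0

-- ===== PRECONDITION & SPEC =====
def Spec_find_first_smaller (arr : List Int) (value : Int) (out : Int) : Prop := out = find_first_smaller_alt arr value
instance (arr : List Int) (value : Int) (out : Int) : Decidable (Spec_find_first_smaller arr value out) := by unfold Spec_find_first_smaller; infer_instance

-- ===== CLAIM (what is proved, stated in full; the proofs are below) =====
def Claim_equal_find_first_smaller : Prop := ∀ (arr : List Int) (value : Int), Dom_find_first_smaller arr value → Spec_find_first_smaller arr value (find_first_smaller arr value)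

-- ===== LEMMAS AND PROOFS =====

-- `mid = (left + right) // 2` satisfies 2*mid ≤ left+right < 2*mid+2
theorem pvMid_bounds (left right : Int) :
    2 * PySem.Int.floordiv (left + right) 2 ≤ left + right ∧
      left + right < 2 * PySem.Int.floordiv (left + right) 2 + 2 := by
  unfold PySem.Int.floordiv
  have h1 := Int.mul_fdiv_add_fmod (left + right) 2
  have h2 : (left + right).fmod 2 = (left + right) % 2 := by
    rw [Int.fmod_eq_emod]; simp
  omega

-- A's loop on bounds [left, right] computes B's helper on the segment arr[left..right]
-- (unless the helper returns -1, in which case the accumulator is returned)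
theorem pvLoopA_eq_helper (arr : List Int) (value : Int) :
    ∀ (fuel : Nat) (left right result : Int), 0 ≤ left → right < arr.length →
      ((arr.drop left.toNat).take (right + 1 - left).toNat).length ≤ fuel →
      pvLoopA arr value fuel left right result =
        (if pvHelperB value ((arr.drop left.toNat).take (right + 1 - left).toNat) left = -1
         then result
         else pvHelperB value ((arr.drop left.toNat).take (right + 1 - left).toNat) left) := by
  intro fuel
  induction fuel with
  | zero =>
    intro left right result h0 hr hf
    have hseg : (arr.drop left.toNat).take (right + 1 - left).toNat = [] :=
      List.eq_nil_of_length_eq_zero (by omega)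
    rw [pvLoopA, hseg, pvHelperB]
    simp
  | succ fuel ih =>
    intro left right result h0 hr hf
    set seg := (arr.drop left.toNat).take (right + 1 - left).toNat with hsegdef
    by_cases hlr : left ≤ right
    · -- non-empty segment
      have hlA : left.toNat < arr.length := by omega
      have hlen : seg.length = (right + 1 - left).toNat := by
        rw [hsegdef]; simp [List.length_take, List.length_drop]; omega
      have hne : seg ≠ [] := by
        intro hc; rw [hc] at hlen; simp at hlen; omega
      rw [pvLoopA, if_pos hlr, pvHelperB, dif_neg hne]
      set k := (seg.length - 1) / 2 with hkdef
      set mid := PySem.Int.floordiv (left + right) 2 with hmiddef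
      have hmb := pvMid_bounds left right
      have hmid : mid = left + (k : Int) := by
        rw [hkdef, hlen]; omega
      have hkt : left.toNat + k < arr.length := by omega
      have hget : (PySem.List.pyGet? arr mid).getD 0 = seg.getD k 0 := by
        have h1 : mid = ((left.toNat + k : Nat) : Int) := by omega
        rw [h1, PySem.List.pyGet?_natCast]
        have hk : k < seg.length := by omega
        rw [List.getElem?_eq_getElem hkt, List.getD_eq_getElem?_getD,
          List.getElem?_eq_getElem hk]
        simp [hsegdef, List.getElem_take, List.getElem_drop]
      rw [hget]
      by_cases hlt : seg.getD k 0 < value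
      · rw [if_pos hlt, if_pos hlt]
        have hseg' : (arr.drop (mid + 1).toNat).take (right + 1 - (mid + 1)).toNat
            = seg.drop (k + 1) := by
          rw [hsegdef, List.drop_take, List.drop_drop]
          congr 1
          · omega
          · congr 1; omega
        have hA := ih (mid + 1) right mid (by omega) hr
          (by rw [hseg', List.length_drop]; omega)
        rw [hA, hseg']
        have hoff : mid + 1 = left + (k : Int) + 1 := by omega
        rw [hoff]
        by_cases hres : pvHelperB value (seg.drop (k + 1)) (left + (k : Int) + 1) = -1
        · have hik : ¬ (left + (k : Int) = -1) := by omega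
          simp [hres, hik, hmid]
        · simp [hres]
      · rw [if_neg hlt, if_neg hlt]
        have hseg'' : (arr.drop left.toNat).take (mid - 1 + 1 - left).toNat = seg.take k := by
          rw [hsegdef, List.take_take]
          congr 1; omega
        have hB := ih left (mid - 1) result h0 (by omega)
          (by rw [hseg'', List.length_take]; omega)
        rw [hB, hseg'']
    · -- empty segment: loop exits, helper returns -1
      have hseg : seg = [] := by
        rw [hsegdef]
        have : (right + 1 - left).toNat = 0 := by omega
        rw [this]; simp
      rw [pvLoopA, if_neg hlr, hseg, pvHelperB]
      simp

-- ===== VERDICT (by name: the statement is the Claim_ definition above) =====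
theorem find_first_smaller_spec : Claim_equal_find_first_smaller := by
  intro arr value _
  unfold Spec_find_first_smaller find_first_smaller find_first_smaller_alt
  have h := pvLoopA_eq_helper arr value arr.length 0 (arr.length - 1) (-1) le_rfl
    (by omega) (by simp)
  simp only [Int.toNat_zero, List.drop_zero] at h
  have hseg : arr.take ((arr.length : Int) - 1 + 1 - 0).toNat = arr := by
    have : ((arr.length : Int) - 1 + 1 - 0).toNat = arr.length := by omega
    rw [this, List.take_length]
  rw [hseg] at h
  rw [h]
  by_cases hb : pvHelperB value arr 0 = -1 <;> simp [hb]
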